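-- pv_equiv track=rewrite | github.com/Jasonmix84/201_Proj1 | p1.py | list_all_times_checked_in
-- ===== SOURCE A (Python) =====
-- def list_all_times_checked_in(if_present):
--    """
--    This function returns a list of when all student(s) FIRST swipe in.
--    :param if_present: Entries of students including names, time of entrance, and date
--    :return: list of data from entries of students that were present
--    """
--    #Gets all numbers in if_present
--    new_if_present = []
--    for i in if_present:
--       i = i[-1:-23:-1]
--       i = i[::-1]
--       new_if_present.append(i)
--
--    #removes them by leaving only names
--    j = 0
--    index = 0
--    final_if_present = []
--    for i in if_present:
--       final_if_present.append( i.rstrip(new_if_present[index]) )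
--       j += 1
--       index += 1
--
--    #go through list and if person name not in the list add them should add everyone only the first time
--    entries_of_person = []
--    log_ins = []
--    for i in final_if_present:
--       if i not in entries_of_person:
--          entries_of_person.append(i)
--
--    #find the values using the number of index in our list above and then add the outpot to list of log_ins
--    indice = 0
--    for i in entries_of_person:
--        log_ins.append(if_present[indice])
--        indice += 1
--
--    return log_ins
-- ===== SOURCE B (Python) =====
-- def list_all_times_checked_in(if_present):
--     """Return each student's first swipe entry: one pass, keeping an entry
--     whenever its name (entry with the time/date suffix stripped) is new."""
--     seen = set()
--     log_ins = []
--     for entry in if_present: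
--         name = entry.rstrip(entry[-22:])
--         if name not in seen:
--             seen.add(name)
--             log_ins.append(entry)
--     return log_ins
-- ===== Notes on version B (the rewrite author's own statement) =====
-- stated objective: faster
-- what changed: A runs four separate loops (build suffix strings, strip them, dedup names by repeated 'not in list' scans, then rebuild output by a sequential counter); B is one pass that keeps an entry exactly when its stripped name is new to a set.
-- intended difference: On inputs where some student's repeat swipe precedes another student's first swipe (the first k stripped names contain a duplicate, k = number of distinct names), A returns just the first k raw entries, repeats included, while B returns each student's actual first entry; B matches the documented purpose 'when all student(s) FIRST swipe in'. — e.g. on list_all_times_checked_in(["baaaaaaaaaaaaaaaaaaaaaa", "baaaaaaaaaaaaaaaaaaaaac", "daaaaaaaaaaaaaaaaaaaaaa"]): A returns ["baaaaaaaaaaaaaaaaaaaaaa", "baaaaaaaaaaaaaaaaaaaaac"], B returns ["baaaaaaaaaaaaaaaaaaaaaa", "daaaaaaaaaaaaaaaaaaaaaa"]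
import Mathlib
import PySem

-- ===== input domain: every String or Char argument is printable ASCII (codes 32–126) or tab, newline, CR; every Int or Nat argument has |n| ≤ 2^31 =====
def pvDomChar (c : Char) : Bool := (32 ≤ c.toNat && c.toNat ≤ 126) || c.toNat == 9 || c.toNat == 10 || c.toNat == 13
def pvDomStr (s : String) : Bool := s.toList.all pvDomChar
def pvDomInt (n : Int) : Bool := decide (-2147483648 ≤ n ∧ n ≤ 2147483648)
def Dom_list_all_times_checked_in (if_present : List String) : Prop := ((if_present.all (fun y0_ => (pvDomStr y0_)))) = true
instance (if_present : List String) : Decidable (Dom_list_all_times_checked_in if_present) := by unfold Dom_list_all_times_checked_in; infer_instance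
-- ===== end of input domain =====

-- B replaces A's four loops by one pass keeping each student's FIRST entry (the
-- documented purpose); where A's sequential-index rebuild returns a repeat entry
-- instead, the difference is stated as D_ below.

-- ===== PORT A =====

-- Hand port of Python's str.rstrip(chars) (PySem has no chars-argument rstrip):
-- drop trailing characters that occur in `chars`; exact for every string.
-- Shared helper: both Source A and Source B call the built-in str.rstrip(chars).
def pyRstripStr (s : String) (chars : String) : String :=
  String.ofList ((s.toList.reverse.dropWhile (fun c => chars.toList.contains c)).reverse)

def list_all_times_checked_in (if_present : List String) : List String :=
  -- loop 1: new_if_present.append(i[-1:-23:-1][::-1])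
  let new_if_present := if_present.foldl (fun acc i =>
    let i1 := (PySem.Str.slice? i (some (-1)) (some (-23)) (-1)).getD ""  -- step ≠ 0, always some
    let i2 := (PySem.Str.slice? i1 none none (-1)).getD ""                -- i[::-1], always some
    acc ++ [i2]) []
  -- loop 2: final_if_present.append(i.rstrip(new_if_present[index])); j, index counters
  -- (index always in range: both lists have length len(if_present), so getD's default is never used)
  let fs := if_present.foldl (fun (st : List String × Int × Nat) i =>
      (st.1 ++ [pyRstripStr i (new_if_present.getD st.2.2 "")], st.2.1 + 1, st.2.2 + 1))
      ([], 0, 0)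
  let final_if_present := fs.1
  -- loop 3: first-occurrence dedup via membership scan
  let entries_of_person := final_if_present.foldl
      (fun ep i => if ep.contains i then ep else ep ++ [i]) []
  -- loop 4: log_ins.append(if_present[indice]); indice += 1
  -- (indice stays < len(if_present) since entries_of_person is never longer; getD default unused)
  let lg := entries_of_person.foldl
      (fun (st : List String × Nat) _i => (st.1 ++ [if_present.getD st.2 ""], st.2 + 1)) ([], 0)
  lg.1

-- ===== PORT B =====
def list_all_times_checked_in_alt (if_present : List String) : List String :=
  (if_present.foldl (fun (st : PySem.Set String × List String) entry =>
      let name := pyRstripStr entry (PySem.Str.slice entry (some (-22)) none)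
      if PySem.Set.contains st.1 name then st
      else (PySem.Set.add st.1 name, st.2 ++ [entry]))
    (PySem.Set.empty, [])).2

-- ===== PRECONDITION & SPEC =====

-- The name on an entry card, as an input attribute (proved below to equal the
-- entry.rstrip(entry[-22:]) transformation the programs apply): the entry without
-- its trailing characters that occur among its last 22 characters.
def pvName (e : String) : String :=
  String.ofList ((e.toList.reverse.dropWhile
    (fun c => decide (c ∈ e.toList.drop (e.toList.length - 22)))).reverse)

-- On inputs where some student's repeat swipe precedes another student's first swipe
-- (the first k stripped names contain a duplicate, k = number of distinct names),
-- A returns just the first k raw entries, repeats included, while B returns each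
-- student's actual first entry; B matches the docstring 'when all student(s) FIRST swipe in'.
def D_list_all_times_checked_in (if_present : List String) : Prop :=
  ¬ ((if_present.map pvName).take (PySem.List.dedup (if_present.map pvName)).length).Nodup
instance (if_present : List String) : Decidable (D_list_all_times_checked_in if_present) := by unfold D_list_all_times_checked_in; infer_instance

def Spec_list_all_times_checked_in (if_present : List String) (out : List String) : Prop := ¬ D_list_all_times_checked_in if_present → out = list_all_times_checked_in_alt if_present
instance (if_present : List String) (out : List String) : Decidable (Spec_list_all_times_checked_in if_present out) := by unfold Spec_list_all_times_checked_in; infer_instance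

def pvDiffWitness_list_all_times_checked_in : List String :=
  ["baaaaaaaaaaaaaaaaaaaaaa", "baaaaaaaaaaaaaaaaaaaaac", "daaaaaaaaaaaaaaaaaaaaaa"]
def pvDiffWitnessOut_list_all_times_checked_in : (List String) × (List String) :=
  (["baaaaaaaaaaaaaaaaaaaaaa", "baaaaaaaaaaaaaaaaaaaaac"],
   ["baaaaaaaaaaaaaaaaaaaaaa", "daaaaaaaaaaaaaaaaaaaaaa"])

-- ===== CLAIM (what is proved, stated in full; the proofs are below) =====
def Claim_unchanged_list_all_times_checked_in : Prop := ∀ (if_present : List String), Dom_list_all_times_checked_in if_present → Spec_list_all_times_checked_in if_present (list_all_times_checked_in if_present)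
def Claim_exact_list_all_times_checked_in : Prop := ∀ (if_present : List String), Dom_list_all_times_checked_in if_present → D_list_all_times_checked_in if_present → list_all_times_checked_in if_present ≠ list_all_times_checked_in_alt if_present
def Claim_changed_list_all_times_checked_in : Prop := Dom_list_all_times_checked_in (pvDiffWitness_list_all_times_checked_in) ∧ D_list_all_times_checked_in (pvDiffWitness_list_all_times_checked_in) ∧ list_all_times_checked_in (pvDiffWitness_list_all_times_checked_in) = pvDiffWitnessOut_list_all_times_checked_in.1 ∧ list_all_times_checked_in_alt (pvDiffWitness_list_all_times_checked_in) = pvDiffWitnessOut_list_all_times_checked_in.2 ∧ pvDiffWitnessOut_list_all_times_checked_in.1 ≠ pvDiffWitnessOut_list_all_times_checked_in.2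

-- ===== LEMMAS AND PROOFS =====

-- The per-entry transformation both programs compute (entry.rstrip(entry[-22:])).
def pvT (e : String) : String := pyRstripStr e (PySem.Str.slice e (some (-22)) none)

lemma pvName_eq_pvT (e : String) : pvName e = pvT e := by
  unfold pvName pvT pyRstripStr
  have h2 : (PySem.Str.slice e (some (-22)) none).toList = e.toList.drop (e.toList.length - 22) := by
    rw [PySem.Str.toList_slice, PySem.Chars.slice_eq_listSlice,
        PySem.List.slice_from_neg_ofNat _ 22 (by omega)]
  rw [h2]
  congr 1
  simp

-- reverse traversal of the last c elements, as slice?'s filterMap-over-range produces it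
lemma range_rev (xs : List Char) (c : Nat) (hc : c ≤ xs.length) :
    List.filterMap (fun x : Nat => xs[(-1 + (xs.length : Int) + -(x:Nat)).toNat]?) (List.range c)
      = (xs.drop (xs.length - c)).reverse := by
  rw [List.filterMap_congr (g := fun x : Nat => some (xs.getD (-1 + (xs.length : Int) + -(x:Nat)).toNat ' '))]
  · rw [show (fun x : Nat => some (xs.getD (-1 + (xs.length : Int) + -(x:Nat)).toNat ' ')) = some ∘ (fun x : Nat => xs.getD (-1 + (xs.length : Int) + -(x:Nat)).toNat ' ') from rfl,
       List.filterMap_eq_map]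
    apply List.ext_getElem
    · simp; omega
    · intro i h1 h2
      simp only [List.length_map, List.length_range] at h1
      simp only [List.length_reverse, List.length_drop] at h2
      simp only [List.getElem_map, List.getElem_range, List.getElem_reverse, List.getElem_drop,
        List.length_drop]
      rw [List.getD_eq_getElem _ _ (by omega)]
      congr 1
      omega
  · intro k hk
    simp only [List.mem_range] at hk
    rw [List.getElem?_eq_getElem (by omega), List.getD_eq_getElem _ _ (by omega)]

-- s[-1:-23:-1] at the list level: the last min(22, n) characters, reversed.
lemma slice?_last22_rev (xs : List Char) :
    PySem.List.slice? xs (some (-1)) (some (-23)) (-1)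
      = some ((xs.drop (xs.length - 22)).reverse) := by
  simp only [PySem.List.slice?, PySem.List.sliceIndices]
  norm_num
  rw [show (if 1 + max (-23 + (xs.length:Int)) (-1) < (xs.length:Int) then (-1 + (xs.length:Int) - max (-23 + (xs.length:Int)) (-1)).toNat else 0) = min 22 xs.length from by split_ifs <;> omega,
     range_rev xs (min 22 xs.length) (by omega),
     show xs.length - min 22 xs.length = xs.length - 22 from by omega]

-- A's i[-1:-23:-1][::-1] equals B's e[-22:].
lemma a_charset_eq (s : String) :
    (PySem.Str.slice? ((PySem.Str.slice? s (some (-1)) (some (-23)) (-1)).getD "") none none (-1)).getD ""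
      = PySem.Str.slice s (some (-22)) none := by
  have h1 : PySem.Str.slice? s (some (-1)) (some (-23)) (-1)
      = some (String.ofList ((s.toList.drop (s.toList.length - 22)).reverse)) := by
    have := PySem.Str.slice?_map s (some (-1)) (some (-23)) (-1)
    rw [PySem.Chars.slice?_eq_listSlice?, slice?_last22_rev] at this
    cases h : PySem.Str.slice? s (some (-1)) (some (-23)) (-1) with
    | none => rw [h] at this; simp at this
    | some t =>
      rw [h] at this
      simp only [Option.map_some, Option.some_inj] at this ⊢
      apply String.toList_inj.mp
      simp [this]
  rw [h1, Option.getD_some, PySem.Str.slice?_none_none_neg_one, Option.getD_some]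
  apply String.toList_inj.mp
  have h2 : (PySem.Str.slice s (some (-22)) none).toList = s.toList.drop (s.toList.length - 22) := by
    rw [PySem.Str.toList_slice, PySem.Chars.slice_eq_listSlice,
        PySem.List.slice_from_neg_ofNat _ 22 (by omega)]
  simp [h2]

-- loop 2 invariant: the rstrip loop over if_present with an index into new_if_present is a map.
lemma loop2_map (xs : List String) (news : List String) (acc : List String) (j : Int) (idx : Nat)
    (h : news.drop idx = xs.map (fun e => PySem.Str.slice e (some (-22)) none)) :
    (xs.foldl (fun (st : List String × Int × Nat) i =>
        (st.1 ++ [pyRstripStr i (news.getD st.2.2 "")], st.2.1 + 1, st.2.2 + 1)) (acc, j, idx)).1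
      = acc ++ xs.map pvT := by
  induction xs generalizing acc j idx with
  | nil => simp
  | cons x xs ih =>
    have hlt : idx < news.length := by
      by_contra hge
      rw [List.drop_eq_nil_of_le (by omega)] at h
      simp at h
    have hcons : news.drop idx = news[idx] :: news.drop (idx + 1) := List.drop_eq_getElem_cons hlt
    have hx : news.getD idx "" = PySem.Str.slice x (some (-22)) none := by
      rw [List.getD_eq_getElem _ _ hlt]
      rw [hcons, List.map_cons] at h
      exact (List.cons.injEq _ _ _ _ ▸ h).1
    have htail : news.drop (idx + 1) = xs.map (fun e => PySem.Str.slice e (some (-22)) none) := by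
      rw [hcons, List.map_cons] at h
      exact (List.cons.injEq _ _ _ _ ▸ h).2
    simp only [List.foldl_cons, List.map_cons]
    rw [ih (acc ++ [pyRstripStr x (news.getD idx "")]) (j+1) (idx+1) htail, hx]
    simp [pvT]

-- loop 3: length of the first-occurrence dedup = card of the value set.
lemma dedup_length (l : List String) (acc : List String) (hnd : acc.Nodup) :
    (l.foldl (fun ep i => if ep.contains i then ep else ep ++ [i]) acc).length
      = (acc.toFinset ∪ l.toFinset).card := by
  induction l generalizing acc with
  | nil => simp [List.toFinset_card_of_nodup hnd]
  | cons x l ih =>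
    simp only [List.foldl_cons]
    by_cases hx : x ∈ acc
    · rw [if_pos (by simpa using hx), ih acc hnd]
      congr 1
      ext y
      simp only [Finset.mem_union, List.mem_toFinset, List.toFinset_cons, Finset.mem_insert]
      constructor
      · rintro (h | h) <;> tauto
      · rintro (h | rfl | h) <;> tauto
    · rw [if_neg (by simpa using hx),
         ih (acc ++ [x]) (by simp [List.nodup_append, hnd]; exact fun a ha hax => hx (hax ▸ ha))]
      congr 1
      ext y
      simp only [Finset.mem_union, List.mem_toFinset, List.toFinset_cons, Finset.mem_insert,
        List.mem_append, List.mem_singleton]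
      tauto

lemma dedup_length_le (l : List String) (acc : List String) :
    (l.foldl (fun ep i => if ep.contains i then ep else ep ++ [i]) acc).length
      ≤ acc.length + l.length := by
  induction l generalizing acc with
  | nil => simp
  | cons x l ih =>
    simp only [List.foldl_cons, List.length_cons]
    split_ifs with h
    · have := ih acc; omega
    · have := ih (acc ++ [x])
      rw [List.length_append, List.length_cons, List.length_nil] at this
      omega

-- loop 4: rebuilding by index is a take.
lemma loop4_take (ys : List String) (src : List String) (acc : List String) (idx : Nat)
    (h : idx + ys.length ≤ src.length) :
    (ys.foldl (fun (st : List String × Nat) _i =>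
        (st.1 ++ [src.getD st.2 ""], st.2 + 1)) (acc, idx)).1
      = acc ++ (src.drop idx).take ys.length := by
  induction ys generalizing acc idx with
  | nil => simp
  | cons y ys ih =>
    simp only [List.foldl_cons, List.length_cons] at h ⊢
    rw [ih (acc ++ [src.getD idx ""]) (idx + 1) (by omega)]
    have hlt : idx < src.length := by omega
    rw [List.getD_eq_getElem _ _ hlt, List.drop_eq_getElem_cons hlt, List.take_succ_cons]
    simp

-- A's value: the first (#distinct names) entries.
lemma a_eq_take (xs : List String) :
    list_all_times_checked_in xs = xs.take ((xs.map pvT).toFinset.card) := by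
  unfold list_all_times_checked_in
  rw [PySem.List.foldl_append_singleton_eq_map
        (f := fun i => (PySem.Str.slice? ((PySem.Str.slice? i (some (-1)) (some (-23)) (-1)).getD "") none none (-1)).getD "")]
  rw [show (fun i => (PySem.Str.slice? ((PySem.Str.slice? i (some (-1)) (some (-23)) (-1)).getD "") none none (-1)).getD "")
        = (fun e => PySem.Str.slice e (some (-22)) none) from funext a_charset_eq]
  simp only [List.nil_append]
  rw [loop2_map xs _ [] 0 0 (by simp)]
  simp only [List.nil_append]
  have hk := dedup_length (xs.map pvT) [] List.nodup_nil
  simp only [List.toFinset_nil, Finset.empty_union] at hk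
  have hkle := dedup_length_le (xs.map pvT) []
  simp only [List.length_nil, List.length_map, Nat.zero_add] at hkle
  rw [loop4_take _ xs [] 0 (by simp only [Nat.zero_add]; exact hkle)]
  simp only [List.nil_append, List.drop_zero, hk]

-- B's traversal as a structural recursion (seen names as a list, appended at the end).
def pvFirstOcc : List String → List String → List String
  | [], _ => []
  | e :: rest, seen =>
      if pvT e ∈ seen then pvFirstOcc rest seen
      else e :: pvFirstOcc rest (seen ++ [pvT e])

lemma b_fold_eq_firstOcc (xs : List String) (S : PySem.Set String) (acc : List String) :
    (xs.foldl (fun (st : PySem.Set String × List String) entry =>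
        let name := pyRstripStr entry (PySem.Str.slice entry (some (-22)) none)
        if PySem.Set.contains st.1 name then st
        else (PySem.Set.add st.1 name, st.2 ++ [entry])) (S, acc)).2
      = acc ++ pvFirstOcc xs S := by
  induction xs generalizing S acc with
  | nil => simp [pvFirstOcc]
  | cons e xs ih =>
    simp only [List.foldl_cons, pvFirstOcc]
    by_cases h : pvT e ∈ S
    · rw [if_pos h]
      have : PySem.Set.contains S (pyRstripStr e (PySem.Str.slice e (some (-22)) none)) = true := by
        simpa [PySem.Set.contains, pvT] using h
      simp only [this, if_true]
      exact ih S acc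
    · rw [if_neg h]
      have hc : PySem.Set.contains S (pyRstripStr e (PySem.Str.slice e (some (-22)) none)) = false := by
        simpa [PySem.Set.contains, pvT] using h
      have ha : PySem.Set.add S (pyRstripStr e (PySem.Str.slice e (some (-22)) none)) = S ++ [pvT e] := by
        simp [PySem.Set.add, PySem.Set.contains, pvT] at hc ⊢
        intro hmem; exact absurd hmem h
      simp only [hc, if_false, Bool.false_eq_true, ha]
      rw [ih (S ++ [pvT e]) (acc ++ [e])]
      simp [pvT]

lemma firstOcc_all_seen (xs seen : List String) (h : ∀ e ∈ xs, pvT e ∈ seen) :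
    pvFirstOcc xs seen = [] := by
  induction xs with
  | nil => rfl
  | cons e xs ih =>
    simp only [pvFirstOcc, if_pos (h e (List.mem_cons_self))]
    exact ih fun a ha => h a (List.mem_cons_of_mem _ ha)

lemma firstOcc_prefix (xs ys seen : List String)
    (hnd : (xs.map pvT).Nodup) (hns : ∀ e ∈ xs, pvT e ∉ seen)
    (hys : ∀ e ∈ ys, pvT e ∈ seen ∨ pvT e ∈ xs.map pvT) :
    pvFirstOcc (xs ++ ys) seen = xs := by
  induction xs generalizing seen with
  | nil =>
    simp only [List.nil_append]
    exact firstOcc_all_seen ys seen fun e he => by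
      rcases hys e he with h | h
      · exact h
      · simp at h
  | cons x xs ih =>
    simp only [List.cons_append, pvFirstOcc, if_neg (hns x List.mem_cons_self)]
    congr 1
    simp only [List.map_cons, List.nodup_cons] at hnd
    refine ih (seen ++ [pvT x]) hnd.2 ?_ ?_
    · intro e he
      simp only [List.mem_append, List.mem_singleton]
      rintro (h | h)
      · exact hns e (List.mem_cons_of_mem _ he) h
      · exact hnd.1 (h ▸ List.mem_map_of_mem he)
    · intro e he
      rcases hys e he with h | h
      · exact Or.inl (by simp [h])
      · simp only [List.map_cons, List.mem_cons] at h
        rcases h with h | h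
        · exact Or.inl (by simp [h])
        · exact Or.inr h

-- k = dedup length = card of the name set.
lemma dedupLen_eq_card (m : List String) :
    (PySem.List.dedup m).length = m.toFinset.card := by
  have hfin : (PySem.List.dedup m).toFinset = m.toFinset := by
    ext y; simp
  rw [← hfin, List.toFinset_card_of_nodup (PySem.List.nodup_dedup m)]

-- B's kept names, recursively: first occurrences of the names not yet seen.
def pvD : List String → List String → List String
  | [], _ => []
  | n :: ns, seen => if n ∈ seen then pvD ns seen else n :: pvD ns (seen ++ [n])

lemma firstOcc_names (xs seen : List String) :
    (pvFirstOcc xs seen).map pvT = pvD (xs.map pvT) seen := by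
  induction xs generalizing seen with
  | nil => rfl
  | cons e xs ih =>
    simp only [pvFirstOcc, List.map_cons, pvD]
    by_cases h : pvT e ∈ seen
    · rw [if_pos h, if_pos h, ih]
    · rw [if_neg h, if_neg h, List.map_cons, ih]

lemma foldl_add_eq_pvD (ns seen : List String) :
    ns.foldl PySem.Set.add seen = seen ++ pvD ns seen := by
  induction ns generalizing seen with
  | nil => simp [pvD]
  | cons n ns ih =>
    simp only [List.foldl_cons, pvD]
    by_cases h : n ∈ seen
    · have ha : PySem.Set.add seen n = seen := by
        simp [PySem.Set.add, PySem.Set.contains, h]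
      rw [if_pos h, ha, ih]
    · have ha : PySem.Set.add seen n = seen ++ [n] := by
        simp [PySem.Set.add, PySem.Set.contains]
        intro hm; exact absurd hm h
      rw [if_neg h, ha, ih (seen ++ [n])]
      simp

lemma pvD_nil_eq_dedup (m : List String) : pvD m [] = PySem.List.dedup m := by
  have h := foldl_add_eq_pvD m []
  simp only [List.nil_append] at h
  rw [← h, PySem.List.dedup_eq_ofList, PySem.Set.ofList_eq_foldl]

-- ===== VERDICT (by name: the statement is the Claim_ definition above) =====
theorem list_all_times_checked_in_spec : Claim_unchanged_list_all_times_checked_in := by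
  intro xs _ hnd
  unfold D_list_all_times_checked_in at hnd
  rw [not_not] at hnd
  rw [show xs.map pvName = xs.map pvT from List.map_congr_left (fun e _ => pvName_eq_pvT e)] at hnd
  set m := xs.map pvT with hm
  set k := (PySem.List.dedup m).length with hkdef
  have hkcard : k = m.toFinset.card := dedupLen_eq_card m
  have hset : (m.take k).toFinset = m.toFinset := by
    apply Finset.eq_of_subset_of_card_le
    · intro y hy
      simp only [List.mem_toFinset] at hy ⊢
      exact List.mem_of_mem_take hy
    · rw [List.toFinset_card_of_nodup hnd, List.length_take, ← hkcard]
      have : k ≤ m.length := by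
        rw [hkcard]; exact m.toFinset_card_le
      omega
  have halt : list_all_times_checked_in_alt xs = xs.take k := by
    unfold list_all_times_checked_in_alt
    rw [b_fold_eq_firstOcc xs PySem.Set.empty []]
    have hsplit : xs = xs.take k ++ xs.drop k := (List.take_append_drop k xs).symm
    rw [List.nil_append]
    conv_lhs => rw [hsplit]
    rw [firstOcc_prefix (xs.take k) (xs.drop k) PySem.Set.empty]
    · rw [List.map_take, ← hm]; exact hnd
    · intro e _ he; simp [PySem.Set.empty] at he
    · intro e he
      right
      rw [List.map_take, ← hm]
      rw [← List.mem_toFinset, hset, List.mem_toFinset, hm]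
      exact List.mem_map_of_mem (List.mem_of_mem_drop he)
  rw [a_eq_take, halt, ← hm, ← hkcard]

theorem list_all_times_checked_in_changed : Claim_changed_list_all_times_checked_in := by
  unfold Claim_changed_list_all_times_checked_in; decide

theorem list_all_times_checked_in_tight : Claim_exact_list_all_times_checked_in := by
  intro xs _ hd heq
  unfold D_list_all_times_checked_in at hd
  rw [show xs.map pvName = xs.map pvT from List.map_congr_left (fun e _ => pvName_eq_pvT e)] at hd
  apply hd
  have hb : list_all_times_checked_in_alt xs = pvFirstOcc xs [] := by
    unfold list_all_times_checked_in_alt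
    rw [b_fold_eq_firstOcc xs PySem.Set.empty [], List.nil_append]
    rfl
  have hA : list_all_times_checked_in xs
      = xs.take (PySem.List.dedup (xs.map pvT)).length := by
    rw [a_eq_take, dedupLen_eq_card]
  have hmap := congrArg (List.map pvT) (hA ▸ hb ▸ heq)
  rw [List.map_take, firstOcc_names, pvD_nil_eq_dedup] at hmap
  rw [hmap]
  exact PySem.List.nodup_dedup _
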